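-- pv_equiv track=rewrite | github.com/pypi-data/pypi-mirror-190 | packages/sleep-models/sleep_models-2.0.0.tar.gz/sleep_models-2.0.0/sleep_models/utils/data.py | sort_celltypes
-- ===== SOURCE A (Python) =====
-- def sort_celltypes(celltypes):
--     celltypes_number  = []
--     celltypes_str = []
--     for celltype in celltypes:
--         try:
--             int(celltype)
--             celltypes_number.append(celltype)
--         except ValueError:
--             celltypes_str.append(celltype)
--
--     celltypes_str=sorted(celltypes_str)
--     celltypes=celltypes_str + celltypes_number
--     return celltypes
-- ===== SOURCE B (Python) =====
-- def sort_celltypes(celltypes):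
--     def _key(celltype):
--         try:
--             int(celltype)
--             return (1, "")
--         except ValueError:
--             return (0, celltype)
--     return sorted(celltypes, key=_key)
-- ===== Notes on version B (the rewrite author's own statement) =====
-- stated objective: idiomatic
-- what changed: Replaced the two-accumulator partition plus separate sort-and-concatenate with a single stable sorted() call whose tuple key sends non-numeric strings to (0, s) and numeric ones to (1, ''), so stability keeps the numeric elements in their original order after all sorted strings.
import Mathlib
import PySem

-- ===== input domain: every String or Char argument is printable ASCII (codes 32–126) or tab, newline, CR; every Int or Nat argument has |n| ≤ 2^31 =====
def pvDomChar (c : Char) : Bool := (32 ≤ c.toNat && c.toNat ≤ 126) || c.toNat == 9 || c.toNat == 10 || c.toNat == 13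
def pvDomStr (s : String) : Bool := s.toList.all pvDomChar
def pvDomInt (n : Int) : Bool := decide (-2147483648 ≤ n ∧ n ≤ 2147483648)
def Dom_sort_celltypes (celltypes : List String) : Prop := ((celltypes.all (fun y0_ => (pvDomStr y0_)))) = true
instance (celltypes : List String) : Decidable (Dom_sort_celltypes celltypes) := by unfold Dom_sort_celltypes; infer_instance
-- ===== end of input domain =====

-- B replaces A's two-list partition + sort + concatenation by one stable sort with a tuple
-- key ((0, s) for non-numeric strings, (1, "") for int-parsable ones); same result, more idiomatic.

-- `int(celltype)` succeeds (both Pythons use this same test)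
def pvIsNum (s : String) : Bool := (PySem.Int.ofStr? s).isSome

-- ===== PORT A =====
def sort_celltypes (celltypes : List String) : List String :=
  -- the for-loop with the try/except partitions into (celltypes_number, celltypes_str)
  let p : List String × List String :=
    celltypes.foldl
      (fun acc celltype =>
        if pvIsNum celltype then (acc.1 ++ [celltype], acc.2)
        else (acc.1, acc.2 ++ [celltype]))
      ([], [])
  PySem.List.sorted p.2 (fun x => x) false ++ p.1

-- ===== PORT B =====
def sort_celltypes_alt (celltypes : List String) : List String :=
  PySem.List.sorted2 celltypes
    (fun x => if pvIsNum x then (1 : Int) else 0)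
    (fun x => if pvIsNum x then "" else x)
    false

-- ===== PRECONDITION & SPEC =====
def Spec_sort_celltypes (celltypes : List String) (out : List String) : Prop := out = sort_celltypes_alt celltypes
instance (celltypes : List String) (out : List String) : Decidable (Spec_sort_celltypes celltypes out) := by unfold Spec_sort_celltypes; infer_instance

-- ===== CLAIM (what is proved, stated in full; the proofs are below) =====
def Claim_equal_sort_celltypes : Prop := ∀ (celltypes : List String), Dom_sort_celltypes celltypes → Spec_sort_celltypes celltypes (sort_celltypes celltypes)

-- ===== LEMMAS AND PROOFS =====

-- B's lexicographic-tuple comparator, unfolded from PySem.List.sorted2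
def pvLexB (a b : String) : Bool :=
  decide ((if pvIsNum a then (1 : Int) else 0) < (if pvIsNum b then (1 : Int) else 0)) ||
  (!decide ((if pvIsNum b then (1 : Int) else 0) < (if pvIsNum a then (1 : Int) else 0)) &&
   decide ((if pvIsNum a then "" else a) < (if pvIsNum b then "" else b)))

-- A numeric element never goes before anything under pvLexB
theorem pvLexB_num_false (x y : String) (hx : pvIsNum x = true) : pvLexB x y = false := by
  unfold pvLexB
  rw [hx]
  by_cases hy : pvIsNum y = true <;> simp [hy]

-- A non-numeric element goes before every numeric one
theorem pvLexB_str_num (x y : String) (hx : pvIsNum x = false) (hy : pvIsNum y = true) :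
    pvLexB x y = true := by
  unfold pvLexB; rw [hx, hy]; simp

-- Between two non-numeric elements pvLexB is the plain string order
theorem pvLexB_str_str (x y : String) (hx : pvIsNum x = false) (hy : pvIsNum y = false) :
    pvLexB x y = decide (x < y) := by
  unfold pvLexB; rw [hx, hy]; simp

-- Inserting a numeric element appends it at the very end
theorem insert_num (x : String) (ys : List String) (hx : pvIsNum x = true) :
    PySem.List.insertBy pvLexB x ys = ys ++ [x] := by
  exact PySem.List.insertBy_of_forall_not_before pvLexB x ys
    (fun y _ => pvLexB_num_false x y hx)

-- Inserting a non-numeric element into (strings ++ numerics) inserts into the string part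
theorem insert_str (x : String) (S N : List String) (hx : pvIsNum x = false)
    (hS : ∀ s ∈ S, pvIsNum s = false) (hN : ∀ n ∈ N, pvIsNum n = true) :
    PySem.List.insertBy pvLexB x (S ++ N) =
      PySem.List.insertBy (fun a b => decide (a < b)) x S ++ N := by
  induction S with
  | nil =>
    cases N with
    | nil => simp [PySem.List.insertBy]
    | cons n ns =>
      have h := pvLexB_str_num x n hx (hN n (by simp))
      simp [PySem.List.insertBy, h]
  | cons s S' ih =>
    have hs : pvIsNum s = false := hS s (by simp)
    have h := pvLexB_str_str x s hx hs
    by_cases hlt : x < s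
    · simp [PySem.List.insertBy, h, hlt]
    · simp only [List.cons_append, PySem.List.insertBy, h, hlt, decide_false,
        Bool.false_eq_true, if_false]
      rw [ih (fun t ht => hS t (by simp [ht]))]

-- Main invariant: B's insertion fold over the comparator keeps the accumulator in the
-- shape (sorted strings so far) ++ (numerics so far, in input order)
theorem fold_inv (xs : List String) :
    ∀ (S N : List String), (∀ s ∈ S, pvIsNum s = false) → (∀ n ∈ N, pvIsNum n = true) →
    xs.foldl (fun acc x => PySem.List.insertBy pvLexB x acc) (S ++ N) =
      (xs.filter (fun x => !pvIsNum x)).foldl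
        (fun acc x => PySem.List.insertBy (fun a b => decide (a < b)) x acc) S ++
      (N ++ xs.filter (fun x => pvIsNum x)) := by
  induction xs with
  | nil => intro S N _ _; simp
  | cons x xs ih =>
    intro S N hS hN
    by_cases hx : pvIsNum x = true
    · have h1 : PySem.List.insertBy pvLexB x (S ++ N) = S ++ (N ++ [x]) := by
        rw [insert_num x (S ++ N) hx, List.append_assoc]
      simp only [List.foldl_cons, h1]
      rw [ih S (N ++ [x]) hS (by intro n hn; rcases List.mem_append.1 hn with h | h
                                 · exact hN n h
                                 · simp at h; subst h; exact hx)]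
      simp [hx]
    · have hx' : pvIsNum x = false := by simpa using hx
      have h1 := insert_str x S N hx' hS hN
      simp only [List.foldl_cons, h1]
      rw [ih (PySem.List.insertBy (fun a b => decide (a < b)) x S) N
          (by intro s hs
              rcases (PySem.List.mem_insertBy _ _ _ _).1 hs with h | h
              · subst h; exact hx'
              · exact hS s h)
          hN]
      simp [hx']

-- A's partition fold returns exactly the two filters
theorem partition_fold (xs : List String) :
    ∀ (a b : List String),
    xs.foldl (fun acc x => if pvIsNum x then (acc.1 ++ [x], acc.2) else (acc.1, acc.2 ++ [x]))
      (a, b) =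
      (a ++ xs.filter (fun x => pvIsNum x), b ++ xs.filter (fun x => !pvIsNum x)) := by
  induction xs with
  | nil => intro a b; simp
  | cons x xs ih =>
    intro a b
    by_cases hx : pvIsNum x = true <;>
      simp [hx, ih, List.append_assoc]

-- ===== VERDICT (by name: the statement is the Claim_ definition above) =====
theorem sort_celltypes_spec : Claim_equal_sort_celltypes := by
  intro celltypes _
  unfold Spec_sort_celltypes sort_celltypes sort_celltypes_alt
  rw [partition_fold celltypes [] []]
  have hB : PySem.List.sorted2 celltypes
      (fun x => if pvIsNum x then (1 : Int) else 0)
      (fun x => if pvIsNum x then "" else x) false =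
      celltypes.foldl (fun acc x => PySem.List.insertBy pvLexB x acc) ([] ++ []) := rfl
  rw [hB, fold_inv celltypes [] [] (by simp) (by simp)]
  rfl
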